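-- pv_equiv track=rewrite | github.com/VovaVeider/RadikNavigatorBot | bot/utils/others/get_all_auditories.py | get_all_auditories
-- ===== SOURCE A (Python) =====
-- def get_all_auditories(auditoriums_to_zones) -> str:
--     floors = {}
--     result_message = ""
--
--     for zone, auditoriums in auditoriums_to_zones.items():
--         floor = zone.split('_')[-1]
--         if floor.isdigit():
--             floor = int(floor)
--             if floor not in floors:
--                 floors[floor] = []
--             floors[floor].extend(auditoriums)
--
--     for floor, auditoriums in sorted(floors.items()):
--         result_message += f"{floor} этаж: {', '.join(sorted(auditoriums))}\n"
--
--     return result_message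
-- ===== SOURCE B (Python) =====
-- def get_all_auditories(auditoriums_to_zones) -> str:
--     # Collect (floor, auditoriums) pairs for zones with a digit suffix,
--     # then emit one line per distinct floor by scanning the pairs - no dict index.
--     entries = []
--     for zone, auditoriums in auditoriums_to_zones.items():
--         suffix = zone.split('_')[-1]
--         if suffix.isdigit():
--             entries.append((int(suffix), auditoriums))
--     lines = []
--     for floor in sorted({f for f, _ in entries}):
--         group = [a for f, auds in entries if f == floor for a in auds]
--         lines.append(f"{floor} этаж: {', '.join(sorted(group))}\n")
--     return "".join(lines)
-- ===== Notes on version B (the rewrite author's own statement) =====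
-- stated objective: alternative
-- what changed: B keeps no floor->list dict: it collects a flat list of (floor, auditoriums) pairs, then builds each output line by scanning that list for the sorted distinct floors, instead of A's incremental dict grouping.
import Mathlib
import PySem

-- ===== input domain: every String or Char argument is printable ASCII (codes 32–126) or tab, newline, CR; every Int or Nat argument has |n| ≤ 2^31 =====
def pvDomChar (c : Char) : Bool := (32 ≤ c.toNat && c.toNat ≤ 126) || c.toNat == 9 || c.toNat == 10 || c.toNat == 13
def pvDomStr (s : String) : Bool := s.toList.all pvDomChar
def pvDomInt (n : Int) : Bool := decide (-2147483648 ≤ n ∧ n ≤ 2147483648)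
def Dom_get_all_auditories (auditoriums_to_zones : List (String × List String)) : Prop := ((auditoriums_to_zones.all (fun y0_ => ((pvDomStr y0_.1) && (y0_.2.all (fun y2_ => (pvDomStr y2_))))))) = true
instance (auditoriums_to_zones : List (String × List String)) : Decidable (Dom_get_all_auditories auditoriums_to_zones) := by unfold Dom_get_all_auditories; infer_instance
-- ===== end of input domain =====

-- B replaces A's dict-based grouping by a flat (floor, auditoriums) pair list scanned once per sorted distinct floor; same result, no dict index (objective: alternative).

-- shared helpers: both Pythons contain these very expressions (the same split/isdigit/int steps and the same f-string)
-- zone.split('_')[-1]  (split('_') is never empty, so [-1] always hits; the getD "" branches are never taken)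
def pvFloorStr (zone : String) : String :=
  (PySem.List.pyGet? ((PySem.Str.split? zone "_").getD []) (-1)).getD ""

-- 'if suffix.isdigit(): int(suffix)' — int(s) is some on every isdigit string, so getD 0 is never taken
def pvFloor? (zone : String) : Option Int :=
  let f := pvFloorStr zone
  if PySem.Str.strIsdigit f then some ((PySem.Int.ofStr? f).getD 0) else none

-- f"{floor} этаж: {', '.join(sorted(auditoriums))}\n"
def pvLine (floor : Int) (auditoriums : List String) : String :=
  PySem.Int.toStr floor ++ " этаж: " ++
    PySem.Str.join ", " (PySem.List.sorted auditoriums (fun x => x) false) ++ "\n"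

-- ===== PORT A =====
-- sorted(floors.items()) compares (int, list) tuples in Python; the dict's keys are distinct,
-- so that tuple sort coincides with sorting by the key alone (key := fst here).
def get_all_auditories (auditoriums_to_zones : List (String × List String)) : String :=
  let floors := auditoriums_to_zones.foldl (fun d p =>
    match pvFloor? p.1 with
    | some f =>
      let d := if d.contains f then d else d.insert f ([] : List String)
      d.insert f (d.getD f [] ++ p.2)
    | none => d) PySem.Dict.empty
  (PySem.List.sorted floors.items (fun q => q.1) false).foldl
    (fun acc q => acc ++ pvLine q.1 q.2) ""

-- ===== PORT B =====
def get_all_auditories_alt (auditoriums_to_zones : List (String × List String)) : String :=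
  let entries := auditoriums_to_zones.filterMap
    (fun p => (pvFloor? p.1).map (fun f => (f, p.2)))
  let floorsSorted := PySem.List.sorted (PySem.Set.ofList (entries.map (·.1))) (fun x => x) false
  PySem.Str.join "" (floorsSorted.map (fun f =>
    pvLine f ((entries.filter (fun q => q.1 == f)).map (·.2)).flatten))

-- ===== PRECONDITION & SPEC =====
def Spec_get_all_auditories (auditoriums_to_zones : List (String × List String)) (out : String) : Prop := out = get_all_auditories_alt auditoriums_to_zones
instance (auditoriums_to_zones : List (String × List String)) (out : String) : Decidable (Spec_get_all_auditories auditoriums_to_zones out) := by unfold Spec_get_all_auditories; infer_instance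

-- ===== CLAIM (what is proved, stated in full; the proofs are below) =====
def Claim_equal_get_all_auditories : Prop := ∀ (auditoriums_to_zones : List (String × List String)), Dom_get_all_auditories auditoriums_to_zones → Spec_get_all_auditories auditoriums_to_zones (get_all_auditories auditoriums_to_zones)

-- ===== LEMMAS AND PROOFS =====

-- A's 'if absent insert []; then extend' step IS Dict.modify with default []
theorem pvStepA_eq_modify (d : PySem.Dict Int (List String)) (f : Int) (v : List String) :
    ((if d.contains f then d else d.insert f ([] : List String)).insert f
      ((if d.contains f then d else d.insert f ([] : List String)).getD f [] ++ v))
      = d.modify f [] (· ++ v) := by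
  by_cases h : d.contains f
  · simp [h, PySem.Dict.modify]
  · have hc : d.contains f = false := by simpa using h
    simp [h, PySem.Dict.modify, PySem.Dict.insert_insert_self, PySem.Dict.getD_insert_self,
      PySem.Dict.getD_of_not_contains d ([] : List String) hc]

-- A's whole loop equals the modify-fold over B's entries list
theorem pvFoldA_eq (l : List (String × List String)) (d : PySem.Dict Int (List String)) :
    l.foldl (fun d p =>
      match pvFloor? p.1 with
      | some f =>
        let d := if d.contains f then d else d.insert f ([] : List String)
        d.insert f (d.getD f [] ++ p.2)
      | none => d) d
    = (l.filterMap (fun p => (pvFloor? p.1).map (fun f => (f, p.2)))).foldl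
        (fun d q => d.modify q.1 [] (· ++ q.2)) d := by
  induction l generalizing d with
  | nil => rfl
  | cons p l ih =>
    cases hf : pvFloor? p.1 with
    | none => simp [List.foldl_cons, hf, ih]
    | some f =>
      simp only [List.foldl_cons, List.filterMap_cons, hf, Option.map_some]
      rw [pvStepA_eq_modify]
      exact ih _

-- value of the grouping fold at any key: everything filed under that floor, in input order
theorem pvGetD_groupFold (es : List (Int × List String)) (d : PySem.Dict Int (List String)) (c : Int) :
    (es.foldl (fun d q => d.modify q.1 [] (· ++ q.2)) d).getD c []
      = d.getD c [] ++ ((es.filter (fun q => q.1 == c)).map (·.2)).flatten := by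
  induction es generalizing d with
  | nil => simp
  | cons q es ih =>
    simp only [List.foldl_cons, ih, List.filter_cons]
    by_cases h : q.1 = c
    · simp [h]
    · have hne : c ≠ q.1 := fun e => h e.symm
      simp [h, hne, PySem.Dict.getD_modify]

theorem pvJoin_nil : PySem.Str.join "" ([] : List String) = "" := by
  apply String.toList_inj.mp
  simp [PySem.Str.join, PySem.Chars.join, List.intercalate]

theorem pvJoin_cons (x : String) (xs : List String) :
    PySem.Str.join "" (x :: xs) = x ++ PySem.Str.join "" xs := by
  apply String.toList_inj.mp
  simp [PySem.Str.join, PySem.Chars.join, String.toList_append, List.intercalate]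
  cases xs <;> simp

-- concatenating lines with foldl is "".join of the mapped lines
theorem pvFoldl_lines (l : List (Int × List String)) (acc : String) :
    l.foldl (fun acc q => acc ++ pvLine q.1 q.2) acc
      = acc ++ PySem.Str.join "" (l.map (fun q => pvLine q.1 q.2)) := by
  induction l generalizing acc with
  | nil => simp [pvJoin_nil]
  | cons q l ih => simp [List.foldl_cons, ih, pvJoin_cons, String.append_assoc]

theorem pvMain (l : List (String × List String)) :
    get_all_auditories l = get_all_auditories_alt l := by
  unfold get_all_auditories get_all_auditories_alt
  dsimp only []
  rw [pvFoldA_eq]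
  set entries := l.filterMap (fun p => (pvFloor? p.1).map (fun f => (f, p.2))) with he
  set d := entries.foldl (fun d q => d.modify q.1 [] (· ++ q.2)) PySem.Dict.empty with hd
  have hnodup : d.keys.Nodup :=
    PySem.Dict.nodup_keys_foldl_modify_key entries Prod.fst [] (fun _ q v => v ++ q.2)
      PySem.Dict.empty (by simp [PySem.Dict.keys_empty])
  have hkeys : d.keys = PySem.Set.ofList (entries.map (·.1)) := by
    have h := PySem.Dict.keys_foldl_modify_key entries Prod.fst [] (fun _ q v => v ++ q.2)
      PySem.Dict.empty
    simpa [PySem.Set.update, PySem.Set.ofList, PySem.Dict.keys_empty] using h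
  have hget : ∀ c, d.getD c [] = ((entries.filter (fun q => q.1 == c)).map (·.2)).flatten := by
    intro c
    simpa using pvGetD_groupFold entries PySem.Dict.empty c
  set ks := PySem.List.sorted (PySem.Set.ofList (entries.map (·.1))) (fun x => x) false with hks
  have hperm : ks.Perm d.keys := by rw [hkeys]; exact PySem.List.sorted_perm _ _ _
  have hsorted : PySem.List.sorted d.items (fun q => q.1) false
      = ks.map (fun f => (f, d.getD f [])) := by
    apply PySem.List.sorted_eq_of_perm_of_pairwise_lt
    · rw [PySem.Dict.items_eq_map_keys d hnodup []]
      exact hperm.map _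
    · have hp : ks.Pairwise (· < ·) := PySem.List.sorted_ofList_pairwise_lt _
      exact List.pairwise_map.mpr (by simpa using hp)
  rw [hsorted, pvFoldl_lines]
  simp only [List.map_map, String.empty_append]
  congr 1
  apply List.map_congr_left
  intro f _
  simp [hget f]

-- ===== VERDICT (by name: the statement is the Claim_ definition above) =====
theorem get_all_auditories_spec : Claim_equal_get_all_auditories := by
  intro l _
  unfold Spec_get_all_auditories
  exact pvMain l
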